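-- pv_equiv track=rewrite | github.com/himesh9887/Myra-AI | MYRA-AI/chat_handler.py | _is_chat_message
-- ===== SOURCE A (Python) =====
-- def _is_chat_message(normalized: str) -> bool:
--     chat_tokens = (
--         "kal baat karte",
--         "kal baat karenge",
--         "kya kar raha hai",
--         "kya kar rahi ho",
--         "kya scene hai",
--         "aur bata",
--         "aur sunao",
--         "kaise ho",
--         "how are you",
--         "what are you doing",
--         "what are you up to",
--         "thanks",
--         "thank you",
--         "shukriya",
--         "bye",
--         "milte hain",
--         "see you",
--         "tum kaun ho",
--         "who are you",
--         "sad",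
--         "stress",
--         "thak gaya",
--         "thak gayi",
--     )
--     return any(token in normalized for token in chat_tokens)
-- ===== SOURCE B (Python) =====
-- def _is_chat_message(normalized: str) -> bool:
--     chat_tokens = (
--         "kal baat karte",
--         "kal baat karenge",
--         "kya kar raha hai",
--         "kya kar rahi ho",
--         "kya scene hai",
--         "aur bata",
--         "aur sunao",
--         "kaise ho",
--         "how are you",
--         "what are you doing",
--         "what are you up to",
--         "thanks",
--         "thank you",
--         "shukriya",
--         "bye",
--         "milte hain",
--         "see you",
--         "tum kaun ho",
--         "who are you",
--         "sad",
--         "stress",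
--         "thak gaya",
--         "thak gayi",
--     )
--     # Build a trie of the phrases (end of a phrase marked with the key None),
--     # then walk the trie from each start position: the trie prunes the search,
--     # comparing each message character against at most one trie level.
--     root = {}
--     for token in chat_tokens:
--         node = root
--         for ch in token:
--             node = node.setdefault(ch, {})
--         node[None] = True
--     return any(_match_at(root, normalized, i) for i in range(len(normalized) + 1))
--
--
-- def _match_at(root, s, i):
--     node = root
--     for j in range(i, len(s)):
--         if None in node:
--             return True
--         ch = s[j]
--         if ch not in node:
--             return False
--         node = node[ch]
--     return None in node
-- ===== Notes on version B (the rewrite author's own statement) =====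
-- stated objective: alternative
-- what changed: B builds a trie of the phrases once and walks it from each start position, replacing A's 23 independent substring searches with one trie-pruned scan.
import Mathlib
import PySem

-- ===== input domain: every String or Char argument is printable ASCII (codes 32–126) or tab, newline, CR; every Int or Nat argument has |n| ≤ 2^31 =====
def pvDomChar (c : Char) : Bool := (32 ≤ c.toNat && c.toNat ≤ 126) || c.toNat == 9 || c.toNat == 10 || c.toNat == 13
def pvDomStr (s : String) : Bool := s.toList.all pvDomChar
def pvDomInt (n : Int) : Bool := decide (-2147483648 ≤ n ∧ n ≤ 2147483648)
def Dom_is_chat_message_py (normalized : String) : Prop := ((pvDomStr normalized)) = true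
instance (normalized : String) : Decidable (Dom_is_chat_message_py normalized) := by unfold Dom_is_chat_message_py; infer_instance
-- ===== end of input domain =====

-- B builds a trie of the phrases and walks it from each start position instead of
-- running one substring search per phrase (objective: alternative).

-- ===== PORT A =====
def chatTokensA : List String :=
  ["kal baat karte", "kal baat karenge", "kya kar raha hai", "kya kar rahi ho",
   "kya scene hai", "aur bata", "aur sunao", "kaise ho", "how are you",
   "what are you doing", "what are you up to", "thanks", "thank you", "shukriya",
   "bye", "milte hain", "see you", "tum kaun ho", "who are you", "sad", "stress",
   "thak gaya", "thak gayi"]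

def is_chat_message_py (normalized : String) : Bool :=
  chatTokensA.any (fun token => PySem.Str.isIn token normalized)

-- ===== PORT B =====
-- a trie over Char; children as an association list (the Python dict), terminal
-- flag = the Python `None` end-of-phrase marker
mutual
inductive Trie where
  | node : Bool → Kids → Trie
inductive Kids where
  | nil : Kids
  | cons : Char → Trie → Kids → Kids
end

def Kids.find? : Kids → Char → Option Trie
  | .nil, _ => none
  | .cons d t k, c => if d = c then some t else k.find? c

def Kids.set : Kids → Char → Trie → Kids
  | .nil, c, t => .cons c t .nil
  | .cons d t' k, c, t => if d = c then .cons d t k else .cons d t' (k.set c t)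

-- node.setdefault(ch, {}) then continue inserting the rest of the token
def Trie.insert : Trie → List Char → Trie
  | .node _ k, [] => .node true k
  | .node b k, c :: cs =>
      .node b (k.set c (((k.find? c).getD (.node false .nil)).insert cs))

-- _match_at: walk the trie along s, True as soon as a terminal node is reached
def Trie.matchAt : Trie → List Char → Bool
  | .node b _, [] => b
  | .node b k, c :: cs =>
      b || (match k.find? c with
            | none => false   -- `if ch not in node: return False`
            | some t => t.matchAt cs)

def chatTokensB : List (List Char) :=
  ["kal baat karte", "kal baat karenge", "kya kar raha hai", "kya kar rahi ho",
   "kya scene hai", "aur bata", "aur sunao", "kaise ho", "how are you",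
   "what are you doing", "what are you up to", "thanks", "thank you", "shukriya",
   "bye", "milte hain", "see you", "tum kaun ho", "who are you", "sad", "stress",
   "thak gaya", "thak gayi"].map String.toList

-- any(_match_at(root, s, i) for i in range(len(s) + 1)): try every suffix
def Trie.scan (t : Trie) : List Char → Bool
  | [] => t.matchAt []
  | c :: cs => t.matchAt (c :: cs) || t.scan cs

def is_chat_message_py_alt (normalized : String) : Bool :=
  (chatTokensB.foldl Trie.insert (.node false .nil)).scan normalized.toList

-- ===== PRECONDITION & SPEC =====
def Spec_is_chat_message_py (normalized : String) (out : Bool) : Prop := out = is_chat_message_py_alt normalized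
instance (normalized : String) (out : Bool) : Decidable (Spec_is_chat_message_py normalized out) := by unfold Spec_is_chat_message_py; infer_instance

-- ===== CLAIM (what is proved, stated in full; the proofs are below) =====
def Claim_equal_is_chat_message_py : Prop := ∀ (normalized : String), Dom_is_chat_message_py normalized → Spec_is_chat_message_py normalized (is_chat_message_py normalized)

-- ===== LEMMAS AND PROOFS =====

theorem find?_set : ∀ (k : Kids) (c d : Char) (t : Trie),
    (k.set c t).find? d = if c = d then some t else k.find? d
  | .nil, c, d, t => by simp [Kids.set, Kids.find?]
  | .cons e t' k, c, d, t => by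
      by_cases h1 : e = c
      · subst h1
        simp only [Kids.set, Kids.find?]
        split_ifs <;> simp_all [Kids.find?]
      · simp only [Kids.set, if_neg h1, Kids.find?, find?_set k c d t]
        split_ifs <;> simp_all

theorem matchAt_empty (s : List Char) :
    Trie.matchAt (.node false .nil) s = false := by
  cases s <;> simp [Trie.matchAt, Kids.find?]

theorem matchAt_insert (w : List Char) : ∀ (t : Trie) (s : List Char),
    (t.insert w).matchAt s = (t.matchAt s || w.isPrefixOf s) := by
  induction w with
  | nil =>
      rintro ⟨b, k⟩ s
      cases s <;> simp [Trie.insert, Trie.matchAt, List.isPrefixOf]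
  | cons c cs ih =>
      rintro ⟨b, k⟩ s
      cases s with
      | nil => simp [Trie.insert, Trie.matchAt, List.isPrefixOf]
      | cons d ds =>
          simp only [Trie.insert, Trie.matchAt, find?_set, List.isPrefixOf]
          by_cases h : c = d
          · subst h
            cases hk : k.find? c with
            | none => simp [ih, matchAt_empty]
            | some t' => simp [ih, Bool.or_assoc]
          · have hb : (c == d) = false := by simp [h]
            rw [if_neg h]
            simp [hb]

theorem matchAt_foldl (l : List (List Char)) : ∀ (t : Trie) (s : List Char),
    (l.foldl Trie.insert t).matchAt s
      = (t.matchAt s || l.any (fun w => w.isPrefixOf s)) := by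
  induction l with
  | nil => intro t s; simp
  | cons w ws ih =>
      intro t s
      simp only [List.foldl_cons, ih, matchAt_insert, List.any_cons, Bool.or_assoc]

theorem scan_foldl (toks : List (List Char)) (cs : List Char) :
    ((toks.foldl Trie.insert (.node false .nil)).scan cs)
      = toks.any (fun t => PySem.Chars.isIn t cs) := by
  induction cs with
  | nil =>
      rw [Trie.scan, matchAt_foldl, matchAt_empty, Bool.false_or, Bool.eq_iff_iff]
      simp only [List.any_eq_true]
      constructor <;> rintro ⟨t, ht, h⟩ <;> refine ⟨t, ht, ?_⟩
      · have := List.isPrefixOf_iff_prefix.mp h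
        simp only [List.prefix_nil] at this
        simp [this]
      · have : t = [] := by simpa [PySem.Chars.isIn_iff_infix, List.infix_nil] using h
        simp [this]
  | cons c rest ih =>
      rw [Trie.scan, matchAt_foldl, matchAt_empty, Bool.false_or, ih, Bool.eq_iff_iff]
      simp only [Bool.or_eq_true, List.any_eq_true]
      constructor
      · rintro (⟨t, ht, h⟩ | ⟨t, ht, h⟩)
        · exact ⟨t, ht, by
            rw [PySem.Chars.isIn_iff_infix]
            exact (List.isPrefixOf_iff_prefix.mp h).isInfix⟩
        · exact ⟨t, ht, by
            rw [PySem.Chars.isIn_iff_infix] at h ⊢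
            exact h.trans (List.suffix_cons c rest).isInfix⟩
      · rintro ⟨t, ht, h⟩
        rw [PySem.Chars.isIn_iff_infix, List.infix_cons_iff] at h
        rcases h with h | h
        · exact Or.inl ⟨t, ht, List.isPrefixOf_iff_prefix.mpr h⟩
        · exact Or.inr ⟨t, ht, (PySem.Chars.isIn_iff_infix _ _).mpr h⟩

-- ===== VERDICT (by name: the statement is the Claim_ definition above) =====
theorem is_chat_message_py_spec : Claim_equal_is_chat_message_py := by
  intro normalized _
  unfold Spec_is_chat_message_py is_chat_message_py is_chat_message_py_alt
  rw [scan_foldl]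
  simp [chatTokensA, chatTokensB, PySem.Str.isIn]
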